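-- pv_equiv track=rewrite | github.com/pbarrett520/closer | test_memory_contamination.py | is_test_memory
-- ===== SOURCE A (Python) =====
-- def is_test_memory(memory_text: str) -> bool:
--     """
--     Detect if a memory entry is test data contamination
--
--     Test data patterns we're looking for:
--     - "Test memory"
--     - "test" (generic test mentions)
--     - "diamonds" (from test_memory.py)
--     - "MCP tool test" (from test_mcp_tools.py)
--     """
--     test_patterns = [
--         "Test memory",
--         "test memory",
--         "MCP tool test",
--         "user loves diamonds",
--         "This is a test",
--         "integration testing",
--         "for testing",
--     ]
--
--     text_lower = memory_text.lower()
--     return any(pattern.lower() in text_lower for pattern in test_patterns)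
-- ===== SOURCE B (Python) =====
-- TEST_PATTERNS = (
--     "test memory",
--     "mcp tool test",
--     "user loves diamonds",
--     "this is a test",
--     "integration testing",
--     "for testing",
-- )
--
--
-- def is_test_memory(memory_text: str) -> bool:
--     t = memory_text.lower()
--     for i in range(len(t)):
--         for p in TEST_PATTERNS:
--             if t.startswith(p, i):
--                 return True
--     return False
-- ===== Notes on version B (the rewrite author's own statement) =====
-- stated objective: alternative
-- what changed: B replaces the seven independent `pattern in text` substring searches by a single left-to-right scan of the lowered text that tests a pre-lowered, deduplicated pattern tuple for a prefix match at each position.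
import Mathlib
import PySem

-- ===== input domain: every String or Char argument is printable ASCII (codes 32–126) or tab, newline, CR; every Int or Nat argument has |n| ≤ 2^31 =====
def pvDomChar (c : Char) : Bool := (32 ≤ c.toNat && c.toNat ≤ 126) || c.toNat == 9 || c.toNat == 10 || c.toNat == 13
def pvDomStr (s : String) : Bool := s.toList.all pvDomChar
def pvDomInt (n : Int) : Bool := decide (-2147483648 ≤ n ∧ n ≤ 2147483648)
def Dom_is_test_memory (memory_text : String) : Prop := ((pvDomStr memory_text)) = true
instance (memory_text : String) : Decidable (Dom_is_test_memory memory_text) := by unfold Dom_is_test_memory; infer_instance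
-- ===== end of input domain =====

-- B replaces the seven independent `pattern in text` substring searches by one
-- left-to-right scan of the lowered text that tests a pre-lowered, deduplicated
-- pattern list for a prefix match at each position (objective: alternative).

-- ===== PORT A =====
def pvTestPatternsA : List String :=
  ["Test memory", "test memory", "MCP tool test", "user loves diamonds",
   "This is a test", "integration testing", "for testing"]

def is_test_memory (memory_text : String) : Bool :=
  let text_lower := PySem.Str.lower memory_text
  pvTestPatternsA.any (fun pattern => PySem.Str.isIn (PySem.Str.lower pattern) text_lower)

-- ===== PORT B =====
def pvTestPatternsB : List (List Char) :=
  ["test memory".toList, "mcp tool test".toList, "user loves diamonds".toList,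
   "this is a test".toList, "integration testing".toList, "for testing".toList]

-- the `for i in range(len(t))` loop of Source B: recursion over successive suffixes of t,
-- `t.startswith(p, i)` = p is a prefix of the suffix at i
def pvScan (l : List Char) : Bool :=
  match l with
  | [] => false
  | c :: rest =>
      (pvTestPatternsB.any (fun p => decide (p <+: (c :: rest)))) || pvScan rest

def is_test_memory_alt (memory_text : String) : Bool :=
  pvScan (PySem.Str.lower memory_text).toList

-- ===== PRECONDITION & SPEC =====
def Spec_is_test_memory (memory_text : String) (out : Bool) : Prop := out = is_test_memory_alt memory_text
instance (memory_text : String) (out : Bool) : Decidable (Spec_is_test_memory memory_text out) := by unfold Spec_is_test_memory; infer_instance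

-- ===== CLAIM (what is proved, stated in full; the proofs are below) =====
def Claim_equal_is_test_memory : Prop := ∀ (memory_text : String), Dom_is_test_memory memory_text → Spec_is_test_memory memory_text (is_test_memory memory_text)

-- ===== LEMMAS AND PROOFS =====

lemma pvScan_true_iff (l : List Char) :
    pvScan l = true ↔ ∃ p ∈ pvTestPatternsB, p <:+: l := by
  induction l with
  | nil =>
      simp only [pvScan]
      constructor
      · intro h; exact absurd h (by simp)
      · rintro ⟨p, hp, hinf⟩
        have : p = [] := List.eq_nil_of_infix_nil hinf
        subst this
        simp [pvTestPatternsB] at hp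
  | cons c rest ih =>
      simp only [pvScan, Bool.or_eq_true, List.any_eq_true, decide_eq_true_eq, ih]
      constructor
      · rintro (⟨p, hp, hpre⟩ | ⟨p, hp, hinf⟩)
        · exact ⟨p, hp, hpre.isInfix⟩
        · exact ⟨p, hp, List.infix_cons_iff.mpr (Or.inr hinf)⟩
      · rintro ⟨p, hp, hinf⟩
        rcases List.infix_cons_iff.mp hinf with hpre | hinf'
        · exact Or.inl ⟨p, hp, hpre⟩
        · exact Or.inr ⟨p, hp, hinf'⟩

lemma pvExistsMemCons {α : Type} {a : α} {l : List α} (h : a ∈ l) (P : α → Prop) :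
    (∃ q ∈ a :: l, P q) ↔ ∃ q ∈ l, P q := by
  constructor
  · rintro ⟨q, hq, hP⟩
    rcases List.mem_cons.mp hq with rfl | hq'
    · exact ⟨q, h, hP⟩
    · exact ⟨q, hq', hP⟩
  · rintro ⟨q, hq, hP⟩
    exact ⟨q, List.mem_cons_of_mem a hq, hP⟩

lemma pvAny_iff (t : List Char) :
    (pvTestPatternsA.any
      (fun pattern => PySem.Chars.isIn (PySem.Chars.lower pattern.toList) t)) = true
      ↔ ∃ p ∈ pvTestPatternsB, p <:+: t := by
  have hmap : pvTestPatternsA.map (fun pat => PySem.Chars.lower pat.toList)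
      = "test memory".toList :: pvTestPatternsB := by decide
  have hmem : "test memory".toList ∈ pvTestPatternsB := by
    unfold pvTestPatternsB; exact List.mem_cons_self
  have h1 : (∃ q ∈ pvTestPatternsA.map (fun pat => PySem.Chars.lower pat.toList), q <:+: t)
      ↔ ∃ p ∈ pvTestPatternsB, p <:+: t := by
    rw [hmap]
    exact pvExistsMemCons hmem _
  rw [List.any_eq_true]
  simp only [PySem.Chars.isIn_iff_infix]
  rw [← h1]
  simp [List.mem_map]

-- ===== VERDICT (by name: the statement is the Claim_ definition above) =====
theorem is_test_memory_spec : Claim_equal_is_test_memory := by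
  intro memory_text _
  unfold Spec_is_test_memory is_test_memory is_test_memory_alt
  rw [Bool.eq_iff_iff, pvScan_true_iff]
  simp only [PySem.Str.isIn_eq, PySem.Str.toList_lower]
  exact pvAny_iff _
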